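-- pv_equiv track=rewrite | github.com/theboyknowsclass/secure_package_manager | backend/scripts/harden_application.py | _find_import_section
-- ===== SOURCE A (Python) =====
-- from typing import Any, Dict, List, Optional, Set, Tuple
--
-- def _find_import_section(content: str) -> Optional[str]:
--     """Find the import section of a file."""
--     lines = content.split("\n")
--     import_lines = []
--
--     for line in lines:
--         if line.strip().startswith(("import ", "from ")):
--             import_lines.append(line)
--         elif line.strip() and not line.strip().startswith("#"):
--             break
--
--     return "\n".join(import_lines) if import_lines else None
-- ===== SOURCE B (Python) =====
-- from typing import Optional
--
-- def _find_import_section(content: str) -> Optional[str]: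
--     """Character-level state machine: scan the raw string once, flush a line at each newline."""
--     collected = []  # finished import lines
--     cur = []        # characters of the line being read
--     stopped = False
--     for ch in content:
--         if ch == "\n":
--             line = "".join(cur)
--             s = line.strip()
--             if s.startswith(("import ", "from ")):
--                 collected.append(line)
--             elif s and not s.startswith("#"):
--                 stopped = True
--                 break
--             cur = []
--         else:
--             cur.append(ch)
--     if not stopped:
--         line = "".join(cur)
--         if line.strip().startswith(("import ", "from ")):
--             collected.append(line)
--     return "\n".join(collected) if collected else None
-- ===== Notes on version B (the rewrite author's own statement) =====
-- stated objective: alternative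
-- what changed: Replaces A's split-then-scan-lines loop with a single character-level state machine over the raw string: it never builds the line list, instead accumulating the current line and flushing it at each newline (collect imports, stop at the first other non-blank non-comment line), with a final flush for the last line.
import Mathlib
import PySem

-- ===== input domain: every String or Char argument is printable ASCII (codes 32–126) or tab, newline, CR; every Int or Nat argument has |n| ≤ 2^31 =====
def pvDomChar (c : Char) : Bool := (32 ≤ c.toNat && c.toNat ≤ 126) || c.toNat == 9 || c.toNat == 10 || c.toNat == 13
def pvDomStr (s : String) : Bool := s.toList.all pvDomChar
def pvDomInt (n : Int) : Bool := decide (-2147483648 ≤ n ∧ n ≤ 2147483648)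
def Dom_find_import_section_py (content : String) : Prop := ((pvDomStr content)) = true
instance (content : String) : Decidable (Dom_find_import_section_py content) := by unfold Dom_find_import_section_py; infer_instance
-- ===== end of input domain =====

-- B replaces A's split-then-scan-lines loop by a single character-level state machine over the raw string (no line list is built): an alternative traversal, same cost.


-- ===== PORT A =====
-- A's loop: append import/from lines; break on the first stripped-nonempty non-comment other line.
def fisLoopA : List (List Char) → List (List Char) → List (List Char)
  | [], acc => acc
  | l :: rest, acc =>
    if PySem.Chars.startswith (PySem.Chars.strip l) "import ".toList || PySem.Chars.startswith (PySem.Chars.strip l) "from ".toList then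
      fisLoopA rest (acc ++ [l])
    else if PySem.Chars.strip l ≠ [] && !PySem.Chars.startswith (PySem.Chars.strip l) "#".toList then
      acc
    else
      fisLoopA rest acc

def find_import_section_py (content : String) : Option String :=
  let lines := PySem.Chars.splitOn content.toList "\n".toList
  let import_lines := fisLoopA lines []
  if import_lines ≠ [] then some (String.ofList (PySem.Chars.join "\n".toList import_lines)) else none

-- ===== PORT B =====
-- B's character-level state machine: state = (remaining chars, current line, collected import lines);
-- at '\n' the current line is classified (collect / stop / skip) and cleared; at the end the last line is flushed.
def fisIsImport (l : List Char) : Bool :=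
  PySem.Chars.startswith (PySem.Chars.strip l) "import ".toList || PySem.Chars.startswith (PySem.Chars.strip l) "from ".toList

def fisGoB : List Char → List Char → List (List Char) → List (List Char)
  | [], cur, collected =>
    -- final flush (the 'if not stopped' tail of B); the 'stop' branch below returns directly instead
    if fisIsImport cur then collected ++ [cur] else collected
  | ch :: rest, cur, collected =>
    if ch = '\n' then
      if fisIsImport cur then fisGoB rest [] (collected ++ [cur])
      else if PySem.Chars.strip cur ≠ [] && !PySem.Chars.startswith (PySem.Chars.strip cur) "#".toList then
        collected   -- stopped = True; break (no final flush)
      else fisGoB rest [] collected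
    else fisGoB rest (cur ++ [ch]) collected

def find_import_section_py_alt (content : String) : Option String :=
  let collected := fisGoB content.toList [] []
  if collected ≠ [] then some (String.ofList (PySem.Chars.join "\n".toList collected)) else none

-- ===== PRECONDITION & SPEC =====
def Spec_find_import_section_py (content : String) (out : Option String) : Prop := out = find_import_section_py_alt content
instance (content : String) (out : Option String) : Decidable (Spec_find_import_section_py content out) := by unfold Spec_find_import_section_py; infer_instance

-- ===== CLAIM (what is proved, stated in full; the proofs are below) =====
def Claim_equal_find_import_section_py : Prop := ∀ (content : String), Dom_find_import_section_py content → Spec_find_import_section_py content (find_import_section_py content)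

-- ===== LEMMAS AND PROOFS =====
-- Reference line-splitter: what content.split("\n") computes, as plain structural recursion.
def fisSpl : List Char → List (List Char)
  | [] => [[]]
  | c :: r => if c = '\n' then [] :: fisSpl r else (fisSpl r).modifyHead (c :: ·)

theorem fisSpl_ne_nil (l : List Char) : fisSpl l ≠ [] := by
  cases l with
  | nil => simp [fisSpl]
  | cons c r =>
    simp only [fisSpl]
    split
    · simp
    · have := fisSpl_ne_nil r
      cases h : fisSpl r with
      | nil => exact absurd h this
      | cons a t => simp [List.modifyHead]

theorem fisGo_eq_spl (fuel : Nat) (l cur : List Char) (acc : List (List Char))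
    (h : l.length ≤ fuel) :
    PySem.Chars.splitOn.go "\n".toList fuel l cur acc
      = acc.reverse ++ (fisSpl l).modifyHead (cur.reverse ++ ·) := by
  induction fuel generalizing l cur acc with
  | zero =>
    have : l = [] := by cases l <;> simp_all
    subst this
    simp [PySem.Chars.splitOn.go, fisSpl]
  | succ fuel ih =>
    cases l with
    | nil => simp [PySem.Chars.splitOn.go, fisSpl]
    | cons c rest =>
      simp only [PySem.Chars.splitOn.go]
      by_cases hc : c = '\n'
      · subst hc
        rw [if_pos (by simp [List.isPrefixOf])]
        have hd : List.drop "\n".toList.length ('\n' :: rest) = rest := rfl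
        rw [hd, ih rest [] _ (by simpa using Nat.le_of_succ_le_succ h)]
        cases hs : fisSpl rest <;> simp [fisSpl, hs, List.modifyHead]
      · rw [if_neg (by simp [List.isPrefixOf]; exact fun hh => absurd hh.symm hc)]
        rw [ih rest (c :: cur) acc (by simpa using Nat.le_of_succ_le_succ h)]
        cases hs : fisSpl rest with
        | nil => exact absurd hs (fisSpl_ne_nil rest)
        | cons a t => simp [fisSpl, hc, hs, List.modifyHead]

theorem splitOn_newline (l : List Char) :
    PySem.Chars.splitOn l "\n".toList = fisSpl l := by
  unfold PySem.Chars.splitOn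
  rw [fisGo_eq_spl (l.length + 1) l [] [] (Nat.le_succ _)]
  cases hs : fisSpl l with
  | nil => exact absurd hs (fisSpl_ne_nil l)
  | cons a t => simp [List.modifyHead]

-- B's char machine equals A's line loop run on the line-splitting of the remaining input,
-- with the partially-read line prepended to the first line.
theorem fisGoB_eq (l : List Char) (cur : List Char) (acc : List (List Char)) :
    fisGoB l cur acc = fisLoopA ((fisSpl l).modifyHead (cur ++ ·)) acc := by
  induction l generalizing cur acc with
  | nil =>
    simp only [fisGoB, fisSpl, List.modifyHead, List.append_nil, fisLoopA, fisIsImport]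
    split
    · rfl
    · split <;> rfl
  | cons c rest ih =>
    simp only [fisGoB]
    by_cases hc : c = '\n'
    · subst hc
      rw [if_pos rfl]
      have hm : List.modifyHead (fun x => cur ++ x) (fisSpl ('\n' :: rest)) = cur :: fisSpl rest := by
        simp [fisSpl, List.modifyHead]
      rw [hm]
      by_cases h1 : fisIsImport cur = true
      · rw [if_pos h1, ih]
        have h2 : fisLoopA (cur :: fisSpl rest) acc = fisLoopA (fisSpl rest) (acc ++ [cur]) := by
          simp only [fisLoopA]
          rw [if_pos (by simpa [fisIsImport] using h1)]
        rw [h2]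
        cases hs : fisSpl rest <;> simp [List.modifyHead]
      · rw [if_neg h1]
        by_cases h3 : (PySem.Chars.strip cur ≠ [] && !PySem.Chars.startswith (PySem.Chars.strip cur) "#".toList) = true
        · rw [if_pos h3]
          simp only [fisLoopA]
          rw [if_neg (by simpa [fisIsImport] using h1), if_pos h3]
        · rw [if_neg h3, ih]
          have h2 : fisLoopA (cur :: fisSpl rest) acc = fisLoopA (fisSpl rest) acc := by
            simp only [fisLoopA]
            rw [if_neg (by simpa [fisIsImport] using h1), if_neg h3]
          rw [h2]
          cases hs : fisSpl rest <;> simp [List.modifyHead]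
    · rw [if_neg hc, ih]
      cases hs : fisSpl rest with
      | nil => exact absurd hs (fisSpl_ne_nil rest)
      | cons a t => simp [fisSpl, hc, hs, List.modifyHead]

-- ===== VERDICT (by name: the statement is the Claim_ definition above) =====
theorem find_import_section_py_spec : Claim_equal_find_import_section_py := by
  intro content _
  unfold Spec_find_import_section_py find_import_section_py find_import_section_py_alt
  rw [splitOn_newline, fisGoB_eq]
  cases hs : fisSpl content.toList with
  | nil => exact absurd hs (fisSpl_ne_nil content.toList)
  | cons a t => simp [List.modifyHead]
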